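-- pv_equiv track=rewrite | github.com/SPQsmk/kaspersky_hackathon | min_path.py | min_down_path
-- ===== SOURCE A (Python) =====
-- def check_index(index, a, b):
--     return a <= index <= b
--
-- def all_path_between_lines(above_line, below_line, all_path, k):
--     new_all_path = []
--     for i, arr in enumerate(all_path):
--         el_index = above_line.index(arr[-1])
--         for dif_k in range(-k, k + 1):
--             if check_index(dif_k + el_index, 0, len(below_line) - 1):
--                 new_all_path.append(
--                     all_path[i] + [below_line[dif_k + el_index]])
--
--     return new_all_path
--
-- def min_down_path(a, max_diff):
--     all_path = [[el] for el in a[0]]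
--     for i in range(len(a) - 1):
--         all_path = all_path_between_lines(a[i], a[i+1], all_path, max_diff)
--
--     min_sum = None
--     for arr in all_path:
--         if min_sum is None or sum(arr) < min_sum:
--             min_sum = sum(arr)
--
--     return min_sum
-- ===== SOURCE B (Python) =====
-- def min_down_path(a, max_diff):
--     # DP: per row keep, for each value that a path can end with, the minimum
--     # partial sum of a path ending with that value (A's continuation of a path
--     # depends only on the value of its last element, via prev.index).
--     best = {v: v for v in a[0]}
--     for i in range(len(a) - 1):
--         prev, cur = a[i], a[i + 1]
--         nxt = {}
--         for v, s in best.items():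
--             j = prev.index(v)
--             for d in range(-max_diff, max_diff + 1):
--                 t = j + d
--                 if 0 <= t < len(cur):
--                     w = cur[t]
--                     c = s + w
--                     if w not in nxt or c < nxt[w]:
--                         nxt[w] = c
--         best = nxt
--     return min(best.values(), default=None)
-- ===== Notes on version B (the rewrite author's own statement) =====
-- stated objective: faster
-- what changed: Replaces A's explicit enumeration of every descending path (exponential in the number of rows) by a per-row dynamic program: a dict mapping each value a path can end with to the minimum partial sum of a path ending with it, with the minimum taken over the dict values at the end; intended as faster (asymptotic) — a timing run recorded faster:unconfirmed because A times out on the larger generated inputs, so no ratio could be measured there.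
import Mathlib
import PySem

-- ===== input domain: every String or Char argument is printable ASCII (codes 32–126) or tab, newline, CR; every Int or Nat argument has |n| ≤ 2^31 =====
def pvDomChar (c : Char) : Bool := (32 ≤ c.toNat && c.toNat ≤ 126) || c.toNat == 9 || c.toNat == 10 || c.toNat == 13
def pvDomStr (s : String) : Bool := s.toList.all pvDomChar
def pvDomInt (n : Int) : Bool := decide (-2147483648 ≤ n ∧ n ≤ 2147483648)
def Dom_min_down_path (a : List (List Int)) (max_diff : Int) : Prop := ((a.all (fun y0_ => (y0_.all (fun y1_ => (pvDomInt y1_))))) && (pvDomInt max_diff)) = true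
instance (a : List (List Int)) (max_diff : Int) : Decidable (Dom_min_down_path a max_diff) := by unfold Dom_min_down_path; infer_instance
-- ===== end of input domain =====

-- B replaces A's explicit enumeration of all paths by a per-row DP dict mapping each
-- possible ending value to the minimum partial sum of a path ending with it
-- (intended as faster; a timing run recorded faster:unconfirmed — A times out on
-- the larger generated inputs, so no ratio could be measured there).

-- ===== PORT A =====
def check_index (index a b : Int) : Bool := decide (a ≤ index ∧ index ≤ b)

def all_path_between_lines (above_line below_line : List Int) (all_path : List (List Int)) (k : Int) : List (List Int) :=
  all_path.foldl (fun new_all_path arr =>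
    match PySem.List.pyGet? arr (-1) with
    | none => new_all_path        -- arr[-1] IndexError: unreachable, A's paths are nonempty
    | some last =>
      match PySem.List.index? above_line last with
      | none => new_all_path      -- .index ValueError: unreachable, A's paths end in above_line
      | some el_index =>
        (PySem.List.pyRange (-k) (k + 1) 1).foldl (fun acc dif_k =>
          if check_index (dif_k + (el_index : Int)) 0 ((below_line.length : Int) - 1) then
            match PySem.List.pyGet? below_line (dif_k + (el_index : Int)) with
            | none => acc         -- in range by check_index: unreachable
            | some w => acc ++ [arr ++ [w]]
          else acc) new_all_path) []

def min_down_path (a : List (List Int)) (max_diff : Int) : Option Int :=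
  match a with
  | [] => none                    -- a[0] raises IndexError: excluded by Pre_
  | a0 :: _ =>
    let all_path0 := a0.map (fun el => [el])
    let all_path := (PySem.List.pyRange 0 ((a.length : Int) - 1) 1).foldl
      (fun ap i => all_path_between_lines (PySem.List.pyGetD a i []) (PySem.List.pyGetD a (i + 1) []) ap max_diff)
      all_path0
    all_path.foldl (fun min_sum arr =>
      match min_sum with
      | none => some arr.sum
      | some m => if arr.sum < m then some arr.sum else min_sum) none

-- ===== PORT B =====
def min_down_path_alt (a : List (List Int)) (max_diff : Int) : Option Int :=
  match a with
  | [] => none                    -- a[0] raises IndexError: excluded by Pre_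
  | a0 :: _ =>
    let best0 : PySem.Dict Int Int := a0.foldl (fun d v => d.insert v v) PySem.Dict.empty
    let best := (PySem.List.pyRange 0 ((a.length : Int) - 1) 1).foldl
      (fun best i =>
        let prev := PySem.List.pyGetD a i []
        let cur := PySem.List.pyGetD a (i + 1) []
        best.items.foldl (fun nxt vs =>
          match PySem.List.index? prev vs.1 with
          | none => nxt           -- prev.index(v) ValueError: unreachable, keys come from prev
          | some j =>
            (PySem.List.pyRange (-max_diff) (max_diff + 1) 1).foldl (fun nxt d =>
              let t := (j : Int) + d
              if 0 ≤ t ∧ t < (cur.length : Int) then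
                match PySem.List.pyGet? cur t with
                | none => nxt     -- in range by the guard: unreachable
                | some w =>
                  let c := vs.2 + w
                  match nxt.get? w with
                  | none => nxt.insert w c
                  | some old => if c < old then nxt.insert w c else nxt
              else nxt) nxt) PySem.Dict.empty)
      best0
    PySem.List.min? best.values (fun x => x)

-- ===== PRECONDITION & SPEC =====
-- Pre_ excludes only the empty grid, on which A raises IndexError (a[0]).
def Pre_min_down_path (a : List (List Int)) (max_diff : Int) : Prop := a ≠ []
instance (a : List (List Int)) (max_diff : Int) : Decidable (Pre_min_down_path a max_diff) := by unfold Pre_min_down_path; infer_instance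
def pvWitness_min_down_path : List (List Int) × Int := ([[1, 2], [3, 4]], 1)

def Spec_min_down_path (a : List (List Int)) (max_diff : Int) (out : Option Int) : Prop := out = min_down_path_alt a max_diff
instance (a : List (List Int)) (max_diff : Int) (out : Option Int) : Decidable (Spec_min_down_path a max_diff out) := by unfold Spec_min_down_path; infer_instance

-- ===== CLAIM (what is proved, stated in full; the proofs are below) =====
def Claim_equal_min_down_path : Prop := ∀ (a : List (List Int)) (max_diff : Int), Dom_min_down_path a max_diff → Pre_min_down_path a max_diff → Spec_min_down_path a max_diff (min_down_path a max_diff)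

-- ===== LEMMAS AND PROOFS =====

-- minimum of a list of ints, as an Option (none on [])
def pvOmin : Option Int → Option Int → Option Int
  | none, y => y
  | some x, none => some x
  | some x, some y => some (min x y)

def pvVmin : List Int → Option Int
  | [] => none
  | x :: l => pvOmin (some x) (pvVmin l)

-- values reachable in the next row from a path whose last element is v
def pvChildren (prev cur : List Int) (k : Int) (v : Int) : List Int :=
  match PySem.List.index? prev v with
  | none => []
  | some j => (PySem.List.pyRange (-k) (k + 1) 1).filterMap (fun d =>
      if 0 ≤ (j : Int) + d ∧ (j : Int) + d < (cur.length : Int) then PySem.List.pyGet? cur ((j : Int) + d) else none)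

-- abstract one-row transition on (ending value, partial sum) pairs
def pvSigma (prev cur : List Int) (k : Int) (e : Int × Int) : List (Int × Int) :=
  (pvChildren prev cur k e.1).map (fun w => (w, e.2 + w))

-- abstraction of a path: (last element, sum)
def pvPi (p : List Int) : Int × Int := (p.getLast?.getD 0, p.sum)

def pvSumsAt (M : List (Int × Int)) (w : Int) : List Int := (M.filter (fun e => e.1 == w)).map (·.2)

-- B's min-insert of one (value, sum) pair
def pvUpd (nxt : PySem.Dict Int Int) (e : Int × Int) : PySem.Dict Int Int :=
  match nxt.get? e.1 with
  | none => nxt.insert e.1 e.2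
  | some old => if e.2 < old then nxt.insert e.1 e.2 else nxt

-- the invariant tying A's path list to B's dict
def pvRel (ap : List (List Int)) (D : PySem.Dict Int Int) : Prop :=
  (∀ p ∈ ap, p ≠ []) ∧ D.keys.Nodup ∧
    ∀ w, D.get? w = pvVmin (pvSumsAt (ap.map pvPi) w)

theorem pvOmin_assoc (a b c : Option Int) : pvOmin (pvOmin a b) c = pvOmin a (pvOmin b c) := by
  cases a <;> cases b <;> cases c <;> simp [pvOmin, min_assoc]

theorem pvVmin_eq_none_iff (l : List Int) : pvVmin l = none ↔ l = [] := by
  cases l with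
  | nil => simp [pvVmin]
  | cons x t => simp [pvVmin]; cases pvVmin t <;> simp [pvOmin]

theorem pvVmin_mem {l : List Int} {m : Int} (h : pvVmin l = some m) : m ∈ l := by
  induction l with
  | nil => simp [pvVmin] at h
  | cons x t ih =>
    simp only [pvVmin] at h
    cases ht : pvVmin t with
    | none => rw [ht] at h; simp [pvOmin] at h; simp [h]
    | some y =>
      rw [ht] at h; simp only [pvOmin, Option.some.injEq] at h
      rcases min_choice x y with hc | hc
      · rw [hc] at h; subst h; exact List.mem_cons_self
      · rw [hc] at h; subst h; exact List.mem_cons_of_mem _ (ih ht)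

theorem pvVmin_le {l : List Int} {x : Int} (h : x ∈ l) : ∃ m, pvVmin l = some m ∧ m ≤ x := by
  induction l with
  | nil => simp at h
  | cons y t ih =>
    simp only [pvVmin]
    rcases List.mem_cons.mp h with rfl | hx
    · cases ht : pvVmin t with
      | none => exact ⟨x, by simp [pvOmin], le_refl x⟩
      | some m => exact ⟨min x m, by simp [pvOmin], min_le_left x m⟩
    · rcases ih hx with ⟨m, hm, hle⟩
      rw [hm]; exact ⟨min y m, by simp [pvOmin], le_trans (min_le_right y m) hle⟩


theorem pvVmin_split {l1 l2 : List Int} (hsub : ∀ x ∈ l1, x ∈ l2)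
    (hdom : ∀ x ∈ l2, ∃ y ∈ l1, y ≤ x) : pvVmin l1 = pvVmin l2 := by
  cases h1 : pvVmin l1 with
  | none =>
    have h1' : l1 = [] := (pvVmin_eq_none_iff l1).mp h1
    subst h1'
    cases h2 : pvVmin l2 with
    | none => rfl
    | some m2 =>
      rcases hdom m2 (pvVmin_mem h2) with ⟨y, hy, _⟩
      simp at hy
  | some m1 =>
    cases h2 : pvVmin l2 with
    | none =>
      have h2' : l2 = [] := (pvVmin_eq_none_iff l2).mp h2
      subst h2'
      exact absurd (hsub m1 (pvVmin_mem h1)) (by simp)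
    | some m2 =>
      have ha : m2 ≤ m1 := by
        rcases pvVmin_le (hsub m1 (pvVmin_mem h1)) with ⟨m, hm, hle⟩
        rw [h2] at hm; cases hm; exact hle
      have hb : m1 ≤ m2 := by
        rcases hdom m2 (pvVmin_mem h2) with ⟨y, hy, hyx⟩
        rcases pvVmin_le hy with ⟨m, hm, hle⟩
        rw [h1] at hm; cases hm; omega
      have : m1 = m2 := le_antisymm hb ha
      rw [this]

theorem mem_pvSumsAt {M : List (Int × Int)} {w x : Int} : x ∈ pvSumsAt M w ↔ (w, x) ∈ M := by
  simp only [pvSumsAt, List.mem_map, List.mem_filter]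
  constructor
  · rintro ⟨⟨v, s⟩, ⟨hm, hv⟩, rfl⟩
    simp only [beq_iff_eq] at hv
    exact hv ▸ hm
  · intro hm
    exact ⟨(w, x), ⟨hm, by simp⟩, rfl⟩

theorem mem_pvSigma {prev cur : List Int} {k : Int} {v s w x : Int} :
    (w, x) ∈ pvSigma prev cur k (v, s) ↔ w ∈ pvChildren prev cur k v ∧ x = s + w := by
  simp only [pvSigma, List.mem_map]
  constructor
  · rintro ⟨u, hu, h⟩
    cases h
    exact ⟨hu, rfl⟩
  · rintro ⟨hw, rfl⟩
    exact ⟨w, hw, rfl⟩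

theorem pvSumsAt_cons (e : Int × Int) (M : List (Int × Int)) (w : Int) :
    pvSumsAt (e :: M) w = if e.1 = w then e.2 :: pvSumsAt M w else pvSumsAt M w := by
  by_cases h : e.1 = w <;> simp [pvSumsAt, List.filter_cons, h]

-- generic loop-shape lemmas
theorem foldl_elim_filterMap {α β γ : Type} (f : β → Option γ) (h : α → γ → α) :
    ∀ (l : List β) (a : α),
      l.foldl (fun acc d => (f d).elim acc (h acc)) a = (l.filterMap f).foldl h a := by
  intro l
  induction l with
  | nil => intro a; rfl
  | cons x t ih =>
    intro a
    simp only [List.foldl_cons, List.filterMap_cons]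
    cases hx : f x with
    | none => exact ih a
    | some v => exact ih (h a v)

theorem foldl_flatMap_eq {α β γ : Type} (σ : β → List γ) (h : α → γ → α) :
    ∀ (l : List β) (a : α),
      l.foldl (fun acc e => (σ e).foldl h acc) a = (l.flatMap σ).foldl h a := by
  intro l
  induction l with
  | nil => intro a; rfl
  | cons x t ih => intro a; simp [List.flatMap_cons, List.foldl_append, ih]

-- ===== A-side characterisation =====
def pvGen (above below : List Int) (k : Int) (arr : List Int) : List (List Int) :=
  match PySem.List.pyGet? arr (-1) with
  | none => []
  | some last => (pvChildren above below k last).map (fun w => arr ++ [w])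

theorem astep_eq_flatMap (above below : List Int) (ap : List (List Int)) (k : Int) :
    all_path_between_lines above below ap k = ap.flatMap (pvGen above below k) := by
  unfold all_path_between_lines
  rw [PySem.List.foldl_congr_mem (g := fun acc arr => acc ++ pvGen above below k arr)]
  · exact PySem.List.foldl_append_eq_flatMap _ _ _
  · intro acc arr _
    unfold pvGen
    cases PySem.List.pyGet? arr (-1) with
    | none => simp
    | some last =>
      simp only []
      unfold pvChildren
      cases PySem.List.index? above last with
      | none => simp
      | some j =>
        simp only []
        rw [PySem.List.foldl_congr_mem (g := fun acc d =>
          ((if 0 ≤ (j : Int) + d ∧ (j : Int) + d < (below.length : Int) then PySem.List.pyGet? below ((j : Int) + d) else none).elim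
            acc (fun w => acc ++ [arr ++ [w]])))]
        · rw [foldl_elim_filterMap
            (f := fun d => if 0 ≤ (j : Int) + d ∧ (j : Int) + d < (below.length : Int) then PySem.List.pyGet? below ((j : Int) + d) else none)
            (h := fun acc w => acc ++ [arr ++ [w]])]
          rw [PySem.List.foldl_append_singleton_eq_map]
        · intro acc2 d _
          have hdj : d + (j : Int) = (j : Int) + d := by omega
          rw [hdj]
          by_cases hc : 0 ≤ (j : Int) + d ∧ (j : Int) + d < (below.length : Int)
          · have hck : check_index ((j : Int) + d) 0 ((below.length : Int) - 1) = true := by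
              unfold check_index
              simp only [decide_eq_true_eq]
              omega
            rw [hck, if_pos rfl, if_pos hc]
            cases PySem.List.pyGet? below ((j : Int) + d) <;> simp [Option.elim]
          · have hck : check_index ((j : Int) + d) 0 ((below.length : Int) - 1) = false := by
              unfold check_index
              simp only [decide_eq_false_iff_not]
              omega
            rw [hck, if_neg hc]
            simp [Option.elim]

theorem pv_flatMap_congr {α β : Type} {l : List α} {f g : α → List β}
    (h : ∀ x ∈ l, f x = g x) : l.flatMap f = l.flatMap g := by
  induction l with
  | nil => rfl
  | cons x t ih =>
    simp only [List.flatMap_cons]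
    rw [h x List.mem_cons_self, ih (fun y hy => h y (List.mem_cons_of_mem _ hy))]

theorem map_pvPi_astep {above below : List Int} {ap : List (List Int)} {k : Int}
    (hne : ∀ p ∈ ap, p ≠ []) :
    (all_path_between_lines above below ap k).map pvPi
      = (ap.map pvPi).flatMap (pvSigma above below k) := by
  rw [astep_eq_flatMap, List.map_flatMap, List.flatMap_map]
  apply pv_flatMap_congr
  intro arr harr
  have hne' := hne arr harr
  unfold pvGen
  rw [PySem.List.pyGet?_neg_one]
  cases hl : arr.getLast? with
  | none => exact absurd (List.getLast?_eq_none_iff.mp hl) hne'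
  | some last =>
    simp only []
    unfold pvSigma pvPi
    rw [hl]
    simp only [Option.getD_some, List.map_map]
    apply List.map_congr_left
    intro w _
    simp [Function.comp, pvPi, List.getLast?_concat]

theorem astep_nonempty {above below : List Int} {ap : List (List Int)} {k : Int} :
    ∀ q ∈ all_path_between_lines above below ap k, q ≠ [] := by
  intro q hq
  rw [astep_eq_flatMap] at hq
  rcases List.mem_flatMap.mp hq with ⟨arr, _, hg⟩
  unfold pvGen at hg
  cases hget : PySem.List.pyGet? arr (-1) with
  | none => rw [hget] at hg; simp at hg
  | some last =>
    rw [hget] at hg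
    simp only [List.mem_map] at hg
    rcases hg with ⟨w, _, rfl⟩
    simp

-- ===== B-side characterisation =====
theorem get?_pvUpd (D : PySem.Dict Int Int) (e : Int × Int) (w : Int) :
    (pvUpd D e).get? w = if w = e.1 then pvOmin (D.get? e.1) (some e.2) else D.get? w := by
  unfold pvUpd
  cases hd : D.get? e.1 with
  | none =>
    by_cases hw : w = e.1
    · subst hw; simp [PySem.Dict.get?_insert_self, pvOmin]
    · simp [PySem.Dict.get?_insert_of_ne _ _ hw, hw]
  | some old =>
    by_cases hw : w = e.1
    · subst hw
      by_cases hlt : e.2 < old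
      · simp [hlt, PySem.Dict.get?_insert_self, pvOmin]; omega
      · simp [hlt, hd, pvOmin]; omega
    · by_cases hlt : e.2 < old <;> simp [hlt, PySem.Dict.get?_insert_of_ne _ _ hw, hw]

theorem nodup_keys_pvUpd {D : PySem.Dict Int Int} (h : D.keys.Nodup) (e : Int × Int) :
    (pvUpd D e).keys.Nodup := by
  unfold pvUpd
  cases D.get? e.1 with
  | none => exact PySem.Dict.nodup_keys_insert _ _ _ h
  | some old =>
    by_cases hlt : e.2 < old <;> simp [hlt]
    · exact PySem.Dict.nodup_keys_insert _ _ _ h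
    · exact h

theorem nodup_keys_foldl_pvUpd :
    ∀ (M : List (Int × Int)) (D : PySem.Dict Int Int), D.keys.Nodup → (M.foldl pvUpd D).keys.Nodup := by
  intro M
  induction M with
  | nil => intro D h; exact h
  | cons e t ih => intro D h; exact ih _ (nodup_keys_pvUpd h e)

theorem get?_foldl_pvUpd (w : Int) :
    ∀ (M : List (Int × Int)) (D : PySem.Dict Int Int),
      (M.foldl pvUpd D).get? w = pvOmin (D.get? w) (pvVmin (pvSumsAt M w)) := by
  intro M
  induction M with
  | nil => intro D; simp [pvSumsAt, pvVmin, pvOmin]; cases D.get? w <;> simp [pvOmin]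
  | cons e t ih =>
    intro D
    simp only [List.foldl_cons]
    rw [ih]
    by_cases hw : w = e.1
    · rw [pvSumsAt_cons, if_pos hw.symm]
      simp only [pvVmin]
      rw [get?_pvUpd, if_pos hw, hw, ← pvOmin_assoc]
    · rw [pvSumsAt_cons, if_neg (fun h => hw h.symm), get?_pvUpd, if_neg hw]

-- B's one-row loop equals a fold of pvUpd over the flattened transitions
theorem bstep_eq (prev cur : List Int) (k : Int) (D : PySem.Dict Int Int) :
    D.items.foldl (fun nxt vs =>
      match PySem.List.index? prev vs.1 with
      | none => nxt
      | some j =>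
        (PySem.List.pyRange (-k) (k + 1) 1).foldl (fun nxt d =>
          let t := (j : Int) + d
          if 0 ≤ t ∧ t < (cur.length : Int) then
            match PySem.List.pyGet? cur t with
            | none => nxt
            | some w =>
              let c := vs.2 + w
              match nxt.get? w with
              | none => nxt.insert w c
              | some old => if c < old then nxt.insert w c else nxt
          else nxt) nxt) PySem.Dict.empty
      = ((D.items.flatMap (pvSigma prev cur k)).foldl pvUpd PySem.Dict.empty) := by
  rw [← foldl_flatMap_eq]
  apply PySem.List.foldl_congr_mem
  intro acc vs _
  unfold pvSigma pvChildren
  cases PySem.List.index? prev vs.1 with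
  | none => simp
  | some j =>
    simp only []
    rw [List.foldl_map]
    rw [← foldl_elim_filterMap (f := fun d =>
        if 0 ≤ (j : Int) + d ∧ (j : Int) + d < (cur.length : Int) then PySem.List.pyGet? cur ((j : Int) + d) else none)
      (h := fun nxt w => pvUpd nxt (w, vs.2 + w))]
    apply PySem.List.foldl_congr_mem
    intro nxt d _
    by_cases hc : 0 ≤ (j : Int) + d ∧ (j : Int) + d < (cur.length : Int)
    · rw [if_pos hc, if_pos hc]
      show _ = (PySem.List.pyGet? cur ((j : Int) + d)).elim nxt (fun w => pvUpd nxt (w, vs.2 + w))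
      cases PySem.List.pyGet? cur ((j : Int) + d) with
      | none => rfl
      | some w => show _ = pvUpd nxt (w, vs.2 + w); unfold pvUpd; rfl
    · rw [if_neg hc, if_neg hc]
      rfl

-- ===== the invariant =====
theorem get?_foldl_insert_self (w : Int) :
    ∀ (a0 : List Int) (d : PySem.Dict Int Int),
      (a0.foldl (fun d v => d.insert v v) d).get? w = if w ∈ a0 then some w else d.get? w := by
  intro a0
  induction a0 with
  | nil => intro d; simp
  | cons x t ih =>
    intro d
    rw [List.foldl_cons, ih]
    by_cases h1 : w ∈ t
    · simp [h1]
    · by_cases h2 : w = x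
      · subst h2; simp [h1, PySem.Dict.get?_insert_self]
      · simp [List.mem_cons, h1, h2, PySem.Dict.get?_insert_of_ne _ _ h2]

theorem pvVmin_diag (w : Int) :
    ∀ a0 : List Int,
      pvVmin (pvSumsAt (a0.map (fun el => (el, el))) w) = if w ∈ a0 then some w else none := by
  intro a0
  induction a0 with
  | nil => simp [pvSumsAt, pvVmin]
  | cons x t ih =>
    rw [List.map_cons, pvSumsAt_cons]
    by_cases hx : x = w
    · subst hx
      simp only [if_pos rfl, pvVmin, ih, List.mem_cons, true_or, if_true]
      by_cases ht : x ∈ t <;> simp [ht, pvOmin]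
    · have hx' : ¬ w = x := fun h => hx h.symm
      simp only [hx, if_false, ih, List.mem_cons, hx', false_or]

theorem rel_init (a0 : List Int) :
    pvRel (a0.map (fun el => [el])) (a0.foldl (fun d v => d.insert v v) PySem.Dict.empty) := by
  refine ⟨?_, ?_, ?_⟩
  · intro p hp
    rcases List.mem_map.mp hp with ⟨el, _, rfl⟩
    simp
  · exact PySem.Dict.nodup_keys_foldl_insert a0 (fun _ x => x) _ PySem.Dict.nodup_keys_empty
  · intro w
    rw [get?_foldl_insert_self]
    have hmap : (a0.map (fun el => [el])).map pvPi = a0.map (fun el => (el, el)) := by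
      rw [List.map_map]; apply List.map_congr_left; intro el _; simp [pvPi, Function.comp]
    rw [hmap, pvVmin_diag]
    simp [PySem.Dict.get?_empty]

theorem rel_step {ap : List (List Int)} {D : PySem.Dict Int Int} (prev cur : List Int) (k : Int)
    (h : pvRel ap D) :
    pvRel (all_path_between_lines prev cur ap k)
      (D.items.foldl (fun nxt vs =>
        match PySem.List.index? prev vs.1 with
        | none => nxt
        | some j =>
          (PySem.List.pyRange (-k) (k + 1) 1).foldl (fun nxt d =>
            let t := (j : Int) + d
            if 0 ≤ t ∧ t < (cur.length : Int) then
              match PySem.List.pyGet? cur t with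
              | none => nxt
              | some w =>
                let c := vs.2 + w
                match nxt.get? w with
                | none => nxt.insert w c
                | some old => if c < old then nxt.insert w c else nxt
            else nxt) nxt) PySem.Dict.empty) := by
  rcases h with ⟨hne, hnd, hget⟩
  refine ⟨astep_nonempty, ?_, ?_⟩
  · rw [bstep_eq]
    exact nodup_keys_foldl_pvUpd _ _ PySem.Dict.nodup_keys_empty
  · intro w
    rw [bstep_eq, get?_foldl_pvUpd, map_pvPi_astep hne]
    have hempty : (PySem.Dict.empty : PySem.Dict Int Int).get? w = none := by
      simp [PySem.Dict.get?_empty]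
    rw [hempty]
    show pvVmin (pvSumsAt (D.items.flatMap (pvSigma prev cur k)) w) = _
    apply pvVmin_split
    · intro x hx
      rcases List.mem_flatMap.mp (mem_pvSumsAt.mp hx) with ⟨⟨v, s⟩, he, hσ⟩
      rcases mem_pvSigma.mp hσ with ⟨hw, rfl⟩
      have hg : D.get? v = some s := PySem.Dict.get?_of_mem_items _ he hnd
      have hv : s ∈ pvSumsAt (ap.map pvPi) v := pvVmin_mem ((hget v).symm.trans hg)
      exact mem_pvSumsAt.mpr (List.mem_flatMap.mpr ⟨(v, s), mem_pvSumsAt.mp hv,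
        mem_pvSigma.mpr ⟨hw, rfl⟩⟩)
    · intro x hx
      rcases List.mem_flatMap.mp (mem_pvSumsAt.mp hx) with ⟨⟨v, s⟩, he, hσ⟩
      rcases mem_pvSigma.mp hσ with ⟨hw, rfl⟩
      have hv : s ∈ pvSumsAt (ap.map pvPi) v := mem_pvSumsAt.mpr he
      rcases pvVmin_le hv with ⟨m, hm, hle⟩
      have hg : D.get? v = some m := (hget v).trans hm
      have hitem : (v, m) ∈ D.items := PySem.Dict.mem_items_of_get?_eq_some _ hg
      refine ⟨m + w, mem_pvSumsAt.mpr (List.mem_flatMap.mpr ⟨(v, m), hitem,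
        mem_pvSigma.mpr ⟨hw, rfl⟩⟩), by omega⟩

theorem foldl_rel {α β γ : Type} (R : α → β → Prop) (f : α → γ → α) (g : β → γ → β)
    (hstep : ∀ a b x, R a b → R (f a x) (g b x)) :
    ∀ (l : List γ) (a : α) (b : β), R a b → R (l.foldl f a) (l.foldl g b) := by
  intro l
  induction l with
  | nil => intro a b h; exact h
  | cons x t ih => intro a b h; exact ih _ _ (hstep a b x h)

-- ===== final extraction =====
theorem afold_min (ap : List (List Int)) :
    ∀ m : Option Int,
      ap.foldl (fun min_sum arr =>
        match min_sum with
        | none => some arr.sum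
        | some mm => if arr.sum < mm then some arr.sum else min_sum) m
        = pvOmin m (pvVmin (ap.map List.sum)) := by
  induction ap with
  | nil => intro m; cases m <;> simp [pvVmin, pvOmin]
  | cons p t ih =>
    intro m
    simp only [List.foldl_cons, List.map_cons, pvVmin]
    rw [ih, ← pvOmin_assoc]
    congr 1
    cases m with
    | none => simp [pvOmin]
    | some mm =>
      simp only [pvOmin]
      by_cases hlt : p.sum < mm <;> simp [hlt] <;> omega

theorem pvVmin_eq_min? (l : List Int) : PySem.List.min? l (fun x => x) = pvVmin l := by
  cases h1 : PySem.List.min? l (fun x => x) with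
  | none =>
    have : l = [] := (PySem.List.min?_eq_none_iff _ _).mp h1
    subst this; rfl
  | some m =>
    have hm : m ∈ l := PySem.List.min?_mem h1
    have hmin : ∀ y ∈ l, m ≤ y := PySem.List.min?_isMin h1
    rcases pvVmin_le hm with ⟨m2, hm2, hle2⟩
    have : m ≤ m2 := hmin m2 (pvVmin_mem hm2)
    rw [hm2]
    congr 1
    omega

theorem rel_final {ap : List (List Int)} {D : PySem.Dict Int Int} (h : pvRel ap D) :
    pvVmin (ap.map List.sum) = pvVmin D.values := by
  rcases h with ⟨-, hnd, hget⟩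
  have hmap : ap.map List.sum = (ap.map pvPi).map (·.2) := by
    rw [List.map_map]; apply List.map_congr_left; intro p _; simp [pvPi, Function.comp]
  rw [hmap]
  refine (pvVmin_split ?_ ?_).symm
  · intro x hx
    have hx' : ∃ v, (v, x) ∈ D.items := by
      simp only [PySem.Dict.values, List.mem_map] at hx
      rcases hx with ⟨⟨v, s⟩, he, rfl⟩
      exact ⟨v, he⟩
    rcases hx' with ⟨v, he⟩
    have hg : D.get? v = some x := PySem.Dict.get?_of_mem_items _ he hnd
    have hvx : x ∈ pvSumsAt (ap.map pvPi) v := pvVmin_mem ((hget v).symm.trans hg)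
    exact List.mem_map.mpr ⟨(v, x), mem_pvSumsAt.mp hvx, rfl⟩
  · intro x hx
    rcases List.mem_map.mp hx with ⟨⟨v, s⟩, he, rfl⟩
    have hv : s ∈ pvSumsAt (ap.map pvPi) v := mem_pvSumsAt.mpr he
    rcases pvVmin_le hv with ⟨m, hm, hle⟩
    have hg : D.get? v = some m := (hget v).trans hm
    have hitem : (v, m) ∈ D.items := PySem.Dict.mem_items_of_get?_eq_some _ hg
    refine ⟨m, ?_, hle⟩
    simp only [PySem.Dict.values, List.mem_map]
    exact ⟨(v, m), hitem, rfl⟩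

-- ===== VERDICT (by name: the statement is the Claim_ definition above) =====
theorem min_down_path_spec : Claim_equal_min_down_path := by
  intro a max_diff _ hpre
  unfold Spec_min_down_path
  cases a with
  | nil => exact absurd rfl hpre
  | cons a0 rest =>
    simp only [min_down_path, min_down_path_alt]
    rw [afold_min, pvVmin_eq_min?]
    have hrel := foldl_rel pvRel _ _
      (fun ap D i hr => rel_step (PySem.List.pyGetD (a0 :: rest) i [])
        (PySem.List.pyGetD (a0 :: rest) (i + 1) []) max_diff hr)
      (PySem.List.pyRange 0 (((a0 :: rest).length : Int) - 1) 1)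
      _ _ (rel_init a0)
    rw [rel_final hrel]
    simp [pvOmin]
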